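-- pv_equiv track=rewrite | github.com/AESpider/maths | crypto/attack/prng/lfsr/lfsr_on_file.py | _poly_mul_mod
-- ===== SOURCE A (Python) =====
-- def _poly_degree(p: int) -> int:
--     return p.bit_length() - 1 if p else -1
--
-- def _poly_mod_reduce(a: int, mod: int) -> int:
--     """Reduce polynomial a modulo mod."""
--     deg_mod = _poly_degree(mod)
--     while True:
--         deg_a = _poly_degree(a)
--         if deg_a < deg_mod:
--             break
--         a ^= (mod << (deg_a - deg_mod))
--     return a
--
-- def _poly_mul_mod(a: int, b: int, mod: int) -> int:
--     """"Multiply a*b in GF(2)[x] and reduce modulo mod."""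
--     if a == 0 or b == 0:
--         return 0
--     res = 0
--     aa = a
--     bb = b
--     while bb:
--         lsb = bb & -bb
--         shift = lsb.bit_length() - 1
--         res ^= (aa << shift)
--         bb ^= lsb
--     return _poly_mod_reduce(res, mod)
-- ===== SOURCE B (Python) =====
-- def _clmul(a: int, b: int) -> int:
--     """Carry-less (GF(2)[x]) product by Karatsuba divide and conquer."""
--     if a < 2 or b < 2:
--         return a * b
--     m = min(a.bit_length(), b.bit_length()) // 2
--     mask = (1 << m) - 1
--     ah, al = a >> m, a & mask
--     bh, bl = b >> m, b & mask
--     z0 = _clmul(al, bl)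
--     z2 = _clmul(ah, bh)
--     z1 = _clmul(ah ^ al, bh ^ bl)
--     return (z2 << (2 * m)) ^ ((z0 ^ z1 ^ z2) << m) ^ z0
--
-- def _poly_mul_mod(a: int, b: int, mod: int) -> int:
--     """Multiply a*b in GF(2)[x] and reduce modulo mod.
--
--     Karatsuba divide-and-conquer carry-less multiplication (three half-size
--     recursive products instead of A's per-set-bit shift-and-add scan),
--     followed by one descending-degree reduction pass.
--     """
--     if a == 0 or b == 0:
--         return 0
--     res = _clmul(a, b)
--     dm = mod.bit_length() - 1
--     for d in range(res.bit_length() - 1, dm - 1, -1):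
--         if (res >> d) & 1:
--             res ^= mod << (d - dm)
--     return res
-- ===== Notes on version B (the rewrite author's own statement) =====
-- stated objective: alternative
-- what changed: Replaced A's per-set-bit shift-and-add scan by a Karatsuba divide-and-conquer carry-less multiplication (split each operand at half the bit length, three half-size recursive products recombined with XORs), followed by one descending-degree reduction pass instead of A's recompute-the-degree while loop.
-- outside the precondition, e.g. on _poly_mul_mod(-1, 7, 2): A returns -1, B returns -7
import Mathlib
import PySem

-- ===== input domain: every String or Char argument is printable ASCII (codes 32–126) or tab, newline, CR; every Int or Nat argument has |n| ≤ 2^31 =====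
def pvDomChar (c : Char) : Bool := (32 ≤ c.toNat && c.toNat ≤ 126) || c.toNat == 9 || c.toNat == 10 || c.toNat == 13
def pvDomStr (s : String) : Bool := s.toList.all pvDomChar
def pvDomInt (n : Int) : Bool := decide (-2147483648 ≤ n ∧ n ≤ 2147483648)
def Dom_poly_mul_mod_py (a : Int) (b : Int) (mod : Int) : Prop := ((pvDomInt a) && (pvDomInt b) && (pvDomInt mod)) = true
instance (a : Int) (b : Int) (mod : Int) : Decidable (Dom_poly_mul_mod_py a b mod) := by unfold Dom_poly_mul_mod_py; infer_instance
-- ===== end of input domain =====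

-- B replaces A's per-set-bit shift-and-add scan by a Karatsuba divide-and-conquer carry-less
-- multiplication (three half-size recursive products recombined with XORs) followed by one
-- descending-degree reduction pass (alternative algorithm). Equality is proved on nonnegative
-- a, b with mod ≥ 1 (plus the a==0/b==0 shortcut).

-- ===== PORT A =====
-- _poly_degree(p) = p.bit_length() - 1 if p else -1
def pyDeg (p : Int) : Int := if p ≠ 0 then (PySem.Int.bitLength p : Int) - 1 else -1

-- _poly_mod_reduce's `while True` loop; the fuel argument only makes the recursion total
-- (on the admitted inputs the value strictly decreases, so the fuel supplied below never runs out).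
-- In the else branch deg a - deg m ≥ 0, so `.toNat` is exact for Python's `mod << (deg_a - deg_mod)`.
def polyModReduceA (m : Int) : Nat → Int → Int
  | 0, a => a
  | f + 1, a =>
    if pyDeg a < pyDeg m then a
    else polyModReduceA m f (PySem.Int.bxor a (m <<< (pyDeg a - pyDeg m).toNat))

-- the `while bb:` loop of _poly_mul_mod; same fuel remark as above
def polyMulLoopA (aa : Int) : Nat → Int → Int → Int
  | 0, res, _ => res
  | f + 1, res, bb =>
    if bb = 0 then res
    else
      let lsb := PySem.Int.band bb (-bb)
      let shift := PySem.Int.bitLength lsb - 1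
      polyMulLoopA aa f (PySem.Int.bxor res (aa <<< shift)) (PySem.Int.bxor bb lsb)

def poly_mul_mod_py (a : Int) (b : Int) (mod : Int) : Int :=
  if a = 0 ∨ b = 0 then 0
  else
    let res := polyMulLoopA a (b.natAbs + 1) 0 b
    polyModReduceA mod (res.natAbs + 1) res

-- ===== PORT B =====
-- _clmul of Source B: Karatsuba divide and conquer; the Nat argument is fuel that only makes the
-- recursion total (every recursive first argument is strictly smaller on the admitted inputs,
-- so the fuel supplied below never runs out).
def kmulB : Nat → Int → Int → Int
  | 0, _, _ => 0
  | f + 1, a, b =>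
    if a < 2 ∨ b < 2 then a * b
    else
      let m := min (PySem.Int.bitLength a) (PySem.Int.bitLength b) / 2
      let mask := ((1 : Int) <<< m) - 1
      let ah := a >>> m
      let al := PySem.Int.band a mask
      let bh := b >>> m
      let bl := PySem.Int.band b mask
      let z0 := kmulB f al bl
      let z2 := kmulB f ah bh
      let z1 := kmulB f (PySem.Int.bxor ah al) (PySem.Int.bxor bh bl)
      PySem.Int.bxor
        (PySem.Int.bxor (z2 <<< (2 * m)) ((PySem.Int.bxor (PySem.Int.bxor z0 z1) z2) <<< m))
        z0

-- `for d in range(res.bit_length() - 1, dm - 1, -1)` of Source B; at counter k+1 the current d is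
-- dm + k (so the Python shift d - dm is exactly k); `dm` is passed as a Nat, which on the
-- admitted inputs (mod ≥ 1) equals Python's mod.bit_length() - 1.
def scanB (m : Int) (dm : Nat) : Nat → Int → Int
  | 0, res => res
  | k + 1, res =>
    let r := if PySem.Int.band (res >>> (dm + k)) 1 ≠ 0 then PySem.Int.bxor res (m <<< k) else res
    scanB m dm k r

def poly_mul_mod_py_alt (a : Int) (b : Int) (mod : Int) : Int :=
  if a = 0 ∨ b = 0 then 0
  else
    let res := kmulB (a.natAbs + 1) a b
    let dm := PySem.Int.bitLength mod - 1
    scanB mod dm (PySem.Int.bitLength res - dm) res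

-- ===== PRECONDITION & SPEC =====
-- Pre_ excludes negative operands and mod < 1 (except under the a==0/b==0 shortcut): there A's and
-- B's bit tricks act on Python's infinite two's complement, where A diverges for negative b or
-- mod ≤ 0 and returns negative two's-complement artefacts for negative a that B does not reproduce.
def Pre_poly_mul_mod_py (a : Int) (b : Int) (mod : Int) : Prop :=
  a = 0 ∨ b = 0 ∨ (0 ≤ a ∧ 0 ≤ b ∧ 1 ≤ mod)
instance (a : Int) (b : Int) (mod : Int) : Decidable (Pre_poly_mul_mod_py a b mod) := by
  unfold Pre_poly_mul_mod_py; infer_instance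

def pvWitness_poly_mul_mod_py : Int × Int × Int := (6, 5, 11)

def Spec_poly_mul_mod_py (a : Int) (b : Int) (mod : Int) (out : Int) : Prop :=
  out = poly_mul_mod_py_alt a b mod
instance (a : Int) (b : Int) (mod : Int) (out : Int) : Decidable (Spec_poly_mul_mod_py a b mod out) := by
  unfold Spec_poly_mul_mod_py; infer_instance

-- ===== CLAIM (what is proved, stated in full; the proofs are below) =====
def Claim_equal_poly_mul_mod_py : Prop :=
  ∀ (a : Int) (b : Int) (mod : Int), Dom_poly_mul_mod_py a b mod →
    Pre_poly_mul_mod_py a b mod → Spec_poly_mul_mod_py a b mod (poly_mul_mod_py a b mod)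

-- ===== LEMMAS AND PROOFS =====

-- Nat-level carry-less (GF(2)[x]) product, the common reference point of both multiply routines.
def mulN (a b : Nat) : Nat :=
  if b = 0 then 0 else ((mulN a (b / 2)) <<< 1) ^^^ (if b % 2 = 1 then a else 0)
  termination_by b
  decreasing_by exact Nat.div_lt_self (Nat.pos_of_ne_zero (by assumption)) one_lt_two

-- lowest set bit, as PySem.Int.band computes bb & -bb for bb > 0
def lowBit (n : Nat) : Nat := n - (n &&& (n - 1))

lemma mulN_zero (a : Nat) : mulN a 0 = 0 := by rw [mulN]; simp

lemma mulN_unfold (a m : Nat) (h : m ≠ 0) :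
    mulN a m = (mulN a (m / 2) <<< 1) ^^^ (if m % 2 = 1 then a else 0) := by
  conv_lhs => rw [mulN]
  rw [if_neg h]

lemma mulN_one (a : Nat) : mulN a 1 = a := by
  rw [mulN_unfold a 1 (by omega), show (1 : Nat) / 2 = 0 from rfl, mulN_zero,
    Nat.zero_shiftLeft]
  simp

lemma and_pred_odd (n : Nat) (h : n % 2 = 1) : n &&& (n - 1) = n - 1 := by
  have hm : (n &&& (n - 1)) % 2 ≠ 1 := fun hx => by
    have := Nat.and_mod_two_eq_one.mp hx
    omega
  have hd : (n &&& (n - 1)) / 2 = n / 2 := by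
    rw [Nat.and_div_two, show (n - 1) / 2 = n / 2 by omega, Nat.and_self]
  omega

lemma and_pred_even (c : Nat) (hc : 0 < c) : (2 * c) &&& (2 * c - 1) = 2 * (c &&& (c - 1)) := by
  have hm : (2 * c &&& (2 * c - 1)) % 2 ≠ 1 := fun hx => by
    have := Nat.and_mod_two_eq_one.mp hx
    omega
  have hd : (2 * c &&& (2 * c - 1)) / 2 = c &&& (c - 1) := by
    rw [Nat.and_div_two, show 2 * c / 2 = c by omega, show (2 * c - 1) / 2 = c - 1 by omega]
  omega

lemma and_pred_lt (n : Nat) (h : 0 < n) : n &&& (n - 1) < n := by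
  have := Nat.and_le_right (n := n) (m := n - 1)
  omega

lemma lowBit_pos (n : Nat) (h : 0 < n) : 0 < lowBit n := by
  have := and_pred_lt n h; unfold lowBit; omega

lemma xor_double (a b : Nat) : (2 * a) ^^^ (2 * b) = 2 * (a ^^^ b) := by
  have hm : ((2 * a) ^^^ (2 * b)) % 2 = 0 := by rw [Nat.xor_mod_two_eq]; omega
  have hd : ((2 * a) ^^^ (2 * b)) / 2 = a ^^^ b := by
    rw [Nat.xor_div_two, show 2 * a / 2 = a by omega, show 2 * b / 2 = b by omega]
  omega

lemma lowBit_even (c : Nat) (hc : 0 < c) : lowBit (2 * c) = 2 * lowBit c := by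
  unfold lowBit
  rw [and_pred_even c hc]
  have := Nat.and_le_right (n := c) (m := c - 1)
  omega

lemma xor_lowBit (n : Nat) (h : 0 < n) : n ^^^ lowBit n = n &&& (n - 1) := by
  induction n using Nat.strong_induction_on with
  | _ n ih =>
    by_cases ho : n % 2 = 1
    · have hl : lowBit n = 1 := by unfold lowBit; rw [and_pred_odd n ho]; omega
      rw [hl, Nat.xor_one_of_odd (Nat.odd_iff.mpr ho), and_pred_odd n ho]
    · obtain ⟨c, rfl⟩ : ∃ c, n = 2 * c := ⟨n / 2, by omega⟩
      have hc : 0 < c := by omega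
      rw [lowBit_even c hc, xor_double, ih c (by omega) hc, and_pred_even c hc]

lemma blN_pos (l : Nat) (h : 0 < l) : 0 < PySem.Int.bitLength (l : Int) := by
  have h1 := PySem.Int.lt_two_pow_bitLength (l : Int)
  rw [Int.natAbs_natCast] at h1
  by_contra hb
  have h0 : PySem.Int.bitLength (l : Int) = 0 := by omega
  rw [h0, pow_zero] at h1
  omega

lemma bl_lt (n : Nat) : n < 2 ^ PySem.Int.bitLength (n : Int) := by
  have h1 := PySem.Int.lt_two_pow_bitLength (n : Int)
  rwa [Int.natAbs_natCast] at h1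

lemma bl_le (n : Nat) (h : n ≠ 0) : 2 ^ (PySem.Int.bitLength (n : Int) - 1) ≤ n := by
  have h1 := PySem.Int.two_pow_bitLength_le (n : Int) (by exact_mod_cast h)
  rwa [Int.natAbs_natCast] at h1

lemma bl_eq (n j : Nat) (h1 : 2 ^ j ≤ n) (h2 : n < 2 ^ (j + 1)) :
    PySem.Int.bitLength (n : Int) = j + 1 := by
  have hn : n ≠ 0 := by
    have : (1 : Nat) ≤ 2 ^ j := Nat.one_le_two_pow
    omega
  have hlt := bl_lt n
  have hle := bl_le n hn
  have hp := blN_pos n (by omega)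
  set L := PySem.Int.bitLength (n : Int) with hL
  have hA : ¬ (L ≤ j) := by
    intro h
    have : (2 : Nat) ^ L ≤ 2 ^ j := Nat.pow_le_pow_right (by omega) h
    omega
  have hB : ¬ (j + 2 ≤ L) := by
    intro h
    have : (2 : Nat) ^ (j + 1) ≤ 2 ^ (L - 1) := Nat.pow_le_pow_right (by omega) (by omega)
    omega
  omega

lemma blN_double (l : Nat) (h : 0 < l) :
    PySem.Int.bitLength ((2 * l : Nat) : Int) = PySem.Int.bitLength (l : Int) + 1 := by
  have h2 := PySem.Int.bitLength_natCast (m := 2 * l) (by omega)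
  rwa [show 2 * l / 2 = l by omega] at h2

lemma mulN_double (a x : Nat) : mulN a (2 * x) = mulN a x <<< 1 := by
  by_cases hx : x = 0
  · subst hx
    rw [show 2 * 0 = 0 by omega, mulN_zero, Nat.zero_shiftLeft]
  · rw [mulN]
    simp [show ¬ (2 * x = 0) by omega, show 2 * x / 2 = x by omega]

-- key identity: removing the lowest set bit of n from the product
lemma mulN_lowBit (a n : Nat) (h : 0 < n) :
    mulN a n = (a <<< (PySem.Int.bitLength ((lowBit n : Nat) : Int) - 1)) ^^^ mulN a (n ^^^ lowBit n) := by
  induction n using Nat.strong_induction_on with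
  | _ n ih =>
    by_cases ho : n % 2 = 1
    · have hl : lowBit n = 1 := by unfold lowBit; rw [and_pred_odd n ho]; omega
      rw [hl, show PySem.Int.bitLength ((1 : Nat) : Int) = 1 from by decide]
      simp only [Nat.sub_self, Nat.shiftLeft_zero]
      rw [Nat.xor_one_of_odd (Nat.odd_iff.mpr ho)]
      by_cases h1 : n = 1
      · subst h1
        rw [show (1 : Nat) - 1 = 0 from rfl, mulN_zero, Nat.xor_zero, mulN_one]
      · rw [mulN_unfold a n (by omega), mulN_unfold a (n - 1) (by omega), if_pos ho,
          if_neg (show ¬ ((n - 1) % 2 = 1) by omega), show (n - 1) / 2 = n / 2 by omega,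
          Nat.xor_zero]
        exact Nat.xor_comm _ _
    · obtain ⟨c, rfl⟩ : ∃ c, n = 2 * c := ⟨n / 2, by omega⟩
      have hc : 0 < c := by omega
      have hlb : 0 < lowBit c := lowBit_pos c hc
      rw [lowBit_even c hc, xor_double, mulN_double, mulN_double,
        blN_double (lowBit c) hlb,
        show PySem.Int.bitLength ((lowBit c : Nat) : Int) + 1 - 1
            = (PySem.Int.bitLength ((lowBit c : Nat) : Int) - 1) + 1 from by
          have := blN_pos (lowBit c) hlb; omega,
        Nat.shiftLeft_add, ← Nat.shiftLeft_xor_distrib, ← ih c (by omega) hc]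

lemma band_neg_self (n : Nat) (h : 0 < n) :
    PySem.Int.band (n : Int) (-(n : Int)) = ((lowBit n : Nat) : Int) := by
  have h1 : (0 : Int) ≤ (n : Int) := by positivity
  have h2 : ¬ ((0 : Int) ≤ -(n : Int)) := by omega
  simp only [PySem.Int.band, h1, if_true, h2, if_false]
  rw [show (-(-(n : Int)) - 1) = ((n - 1 : Nat) : Int) by push_cast [h]; omega]
  rw [Int.toNat_natCast, Int.toNat_natCast]
  rfl

lemma loopA_eq (aN : Nat) : ∀ (bN : Nat) (fuel : Nat) (res : Nat), bN < fuel →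
    polyMulLoopA (aN : Int) fuel (res : Int) (bN : Int) = ((res ^^^ mulN aN bN : Nat) : Int) := by
  intro bN
  induction bN using Nat.strong_induction_on with
  | _ bN ih =>
    intro fuel res hf
    cases fuel with
    | zero => omega
    | succ f =>
      by_cases hb : bN = 0
      · subst hb
        simp only [polyMulLoopA, Nat.cast_zero, if_true]
        rw [mulN_zero, Nat.xor_zero]
      · have hb' : 0 < bN := by omega
        simp only [polyMulLoopA]
        rw [if_neg (by exact_mod_cast hb)]
        rw [band_neg_self bN hb', PySem.Int.bxor_natCast, ← Int.natCast_shiftLeft,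
          PySem.Int.bxor_natCast]
        rw [ih (bN ^^^ lowBit bN)
          (by rw [xor_lowBit bN hb']; exact and_pred_lt bN hb')
          f (res ^^^ aN <<< (PySem.Int.bitLength ((lowBit bN : Nat) : Int) - 1))
          (by rw [xor_lowBit bN hb']; have := and_pred_lt bN hb'; omega)]
        congr 1
        rw [Nat.xor_assoc, ← mulN_lowBit aN bN hb']

-- ---- B side: Karatsuba correctness over mulN ----

lemma xor_cancel_left' (a b : Nat) : a ^^^ (a ^^^ b) = b := by
  rw [← Nat.xor_assoc, Nat.xor_self, Nat.zero_xor]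

lemma xor_two_mul_add (x y ex ey : Nat) (hex : ex < 2) (hey : ey < 2) :
    (2 * x + ex) ^^^ (2 * y + ey) = 2 * (x ^^^ y) + (ex + ey) % 2 := by
  have hm : ((2 * x + ex) ^^^ (2 * y + ey)) % 2 = (ex + ey) % 2 := by
    rw [Nat.xor_mod_two_eq]; omega
  have hd : ((2 * x + ex) ^^^ (2 * y + ey)) / 2 = x ^^^ y := by
    rw [Nat.xor_div_two, show (2 * x + ex) / 2 = x by omega, show (2 * y + ey) / 2 = y by omega]
  omega

lemma shiftLeft_xor_add (m : Nat) : ∀ (q r : Nat), r < 2 ^ m → (q <<< m) ^^^ r = q * 2 ^ m + r := by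
  induction m with
  | zero =>
    intro q r hr
    have : r = 0 := by simpa using hr
    subst this
    simp [Nat.shiftLeft_zero]
  | succ m ih =>
    intro q r hr
    have hr2 : r / 2 < 2 ^ m := by
      rw [pow_succ] at hr
      omega
    have h1 : q <<< (m + 1) = 2 * (q <<< m) + 0 := by
      rw [Nat.shiftLeft_succ]
      omega
    calc (q <<< (m + 1)) ^^^ r
        = (2 * (q <<< m) + 0) ^^^ (2 * (r / 2) + r % 2) := by rw [← h1]; congr 1; omega
      _ = 2 * ((q <<< m) ^^^ (r / 2)) + (0 + r % 2) % 2 := by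
          exact xor_two_mul_add _ _ _ _ (by omega) (by omega)
      _ = 2 * (q * 2 ^ m + r / 2) + r % 2 := by rw [ih q (r / 2) hr2]; omega
      _ = q * 2 ^ (m + 1) + r := by rw [pow_succ]; ring_nf; omega

lemma split_xor (a m : Nat) : ((a >>> m) <<< m) ^^^ (a % 2 ^ m) = a := by
  rw [shiftLeft_xor_add m _ _ (Nat.mod_lt a (by positivity)), Nat.shiftRight_eq_div_pow,
    Nat.mul_comm]
  exact Nat.div_add_mod a (2 ^ m)

lemma mulN_zero_left (b : Nat) : mulN 0 b = 0 := by
  induction b using Nat.strong_induction_on with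
  | _ b ih =>
    by_cases hb : b = 0
    · subst hb; exact mulN_zero 0
    · rw [mulN_unfold 0 b hb, ih (b / 2) (by omega), Nat.zero_shiftLeft]
      split_ifs <;> rfl

lemma mulN_one_left (b : Nat) : mulN 1 b = b := by
  induction b using Nat.strong_induction_on with
  | _ b ih =>
    by_cases hb : b = 0
    · subst hb; exact mulN_zero 1
    · rw [mulN_unfold 1 b hb, ih (b / 2) (by omega),
        show (if b % 2 = 1 then 1 else 0) = b % 2 from by split_ifs <;> omega,
        show (b / 2) <<< 1 = ((b / 2) <<< 1) ^^^ 0 from (Nat.xor_zero _).symm,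
        Nat.xor_assoc, Nat.zero_xor,
        shiftLeft_xor_add 1 (b / 2) (b % 2) (by omega)]
      omega

lemma mulN_small (a b : Nat) (h : a < 2 ∨ b < 2) : mulN a b = a * b := by
  rcases h with h | h
  · interval_cases a
    · rw [mulN_zero_left]; omega
    · rw [mulN_one_left]; omega
  · interval_cases b
    · rw [mulN_zero]; omega
    · rw [mulN_one]; omega

lemma mulN_xor_right (a : Nat) : ∀ (x y : Nat), mulN a (x ^^^ y) = mulN a x ^^^ mulN a y := by
  intro x
  induction x using Nat.strong_induction_on with
  | _ x ih =>
    intro y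
    by_cases hx : x = 0
    · subst hx; rw [Nat.zero_xor, mulN_zero, Nat.zero_xor]
    by_cases hy : y = 0
    · subst hy; rw [Nat.xor_zero, mulN_zero, Nat.xor_zero]
    by_cases hz : x ^^^ y = 0
    · obtain rfl : x = y := Nat.xor_eq_zero_iff.mp hz
      rw [hz, mulN_zero, Nat.xor_self]
    · rw [mulN_unfold a (x ^^^ y) hz, mulN_unfold a x hx, mulN_unfold a y hy,
        Nat.xor_div_two, ih (x / 2) (by omega) (y / 2), Nat.shiftLeft_xor_distrib]
      have hpz : (x ^^^ y) % 2 = (x % 2 + y % 2) % 2 := by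
        rw [Nat.xor_mod_two_eq]; omega
      rcases Nat.mod_two_eq_zero_or_one x with h1 | h1 <;>
        rcases Nat.mod_two_eq_zero_or_one y with h2 | h2 <;>
        simp [hpz, h1, h2, Nat.xor_assoc, Nat.xor_comm, Nat.xor_left_comm, Nat.xor_self,
          Nat.xor_zero, Nat.zero_xor, xor_cancel_left']

lemma mulN_xor_left : ∀ (b x y : Nat), mulN (x ^^^ y) b = mulN x b ^^^ mulN y b := by
  intro b
  induction b using Nat.strong_induction_on with
  | _ b ih =>
    intro x y
    by_cases hb : b = 0
    · subst hb; rw [mulN_zero, mulN_zero, mulN_zero]; simp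
    · rw [mulN_unfold _ b hb, mulN_unfold x b hb, mulN_unfold y b hb,
        ih (b / 2) (by omega) x y, Nat.shiftLeft_xor_distrib]
      rcases Nat.mod_two_eq_zero_or_one b with h1 | h1 <;>
        simp [h1, Nat.xor_assoc, Nat.xor_comm, Nat.xor_left_comm, Nat.xor_self,
          Nat.xor_zero, Nat.zero_xor, xor_cancel_left']

lemma mulN_shl_left : ∀ (b x k : Nat), mulN (x <<< k) b = mulN x b <<< k := by
  intro b
  induction b using Nat.strong_induction_on with
  | _ b ih =>
    intro x k
    by_cases hb : b = 0
    · subst hb; rw [mulN_zero, mulN_zero, Nat.zero_shiftLeft]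
    · rw [mulN_unfold _ b hb, mulN_unfold x b hb, ih (b / 2) (by omega) x k,
        Nat.shiftLeft_xor_distrib,
        show (mulN x (b / 2) <<< k) <<< 1 = (mulN x (b / 2) <<< 1) <<< k from by
          rw [← Nat.shiftLeft_add, ← Nat.shiftLeft_add, Nat.add_comm],
        show (if b % 2 = 1 then x <<< k else 0) = (if b % 2 = 1 then x else 0) <<< k from by
          split_ifs <;> simp [Nat.zero_shiftLeft]]

lemma mulN_shl_right (a : Nat) : ∀ (k x : Nat), mulN a (x <<< k) = mulN a x <<< k := by
  intro k
  induction k with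
  | zero => intro x; rw [Nat.shiftLeft_zero, Nat.shiftLeft_zero]
  | succ k ih =>
    intro x
    rw [Nat.shiftLeft_succ, mulN_double, ih x, ← Nat.shiftLeft_add, Nat.add_comm,
      Nat.shiftLeft_add]

lemma karat_core (m ah al bh bl : Nat) :
    PySem.Int.bxor
        (PySem.Int.bxor ((((mulN ah bh : Nat) : Int)) <<< (2 * m))
          ((PySem.Int.bxor (PySem.Int.bxor ((mulN al bl : Nat) : Int)
              ((mulN (ah ^^^ al) (bh ^^^ bl) : Nat) : Int)) ((mulN ah bh : Nat) : Int)) <<< m))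
        ((mulN al bl : Nat) : Int)
      = ((mulN ((ah <<< m) ^^^ al) ((bh <<< m) ^^^ bl) : Nat) : Int) := by
  rw [PySem.Int.bxor_natCast, PySem.Int.bxor_natCast, ← Int.natCast_shiftLeft,
    ← Int.natCast_shiftLeft, PySem.Int.bxor_natCast, PySem.Int.bxor_natCast]
  congr 1
  simp only [mulN_xor_left, mulN_xor_right, mulN_shl_left, mulN_shl_right,
    Nat.shiftLeft_xor_distrib, show 2 * m = m + m from by omega, Nat.shiftLeft_add]
  simp [Nat.xor_assoc, Nat.xor_comm, Nat.xor_left_comm, Nat.xor_self,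
    Nat.xor_zero, Nat.zero_xor, xor_cancel_left']

lemma kmul_eq : ∀ (aN : Nat) (fuel : Nat) (bN : Nat), aN < fuel →
    kmulB fuel (aN : Int) (bN : Int) = ((mulN aN bN : Nat) : Int) := by
  intro aN
  induction aN using Nat.strong_induction_on with
  | _ aN ih =>
    intro fuel bN hf
    cases fuel with
    | zero => omega
    | succ f =>
      simp only [kmulB]
      by_cases hsmall : (aN : Int) < 2 ∨ (bN : Int) < 2
      · rw [if_pos hsmall, mulN_small aN bN (by
          rcases hsmall with h | h
          · left; exact_mod_cast h
          · right; exact_mod_cast h)]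
        push_cast; ring
      · rw [if_neg hsmall]
        have ha2 : 2 ≤ aN := by
          by_contra h; exact hsmall (Or.inl (by exact_mod_cast (by omega : (aN : Nat) < 2)))
        have hb2 : 2 ≤ bN := by
          by_contra h; exact hsmall (Or.inr (by exact_mod_cast (by omega : (bN : Nat) < 2)))
        set bla := PySem.Int.bitLength (aN : Int) with hbla
        set blb := PySem.Int.bitLength (bN : Int) with hblb
        have hbla2 : 2 ≤ bla := by
          by_contra h
          have h1 := bl_lt aN
          have h2 : (2 : Nat) ^ PySem.Int.bitLength ((aN : Nat) : Int) ≤ 2 ^ 1 :=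
            Nat.pow_le_pow_right (by omega) (by omega)
          omega
        have hblb2 : 2 ≤ blb := by
          by_contra h
          have h1 := bl_lt bN
          have h2 : (2 : Nat) ^ PySem.Int.bitLength ((bN : Nat) : Int) ≤ 2 ^ 1 :=
            Nat.pow_le_pow_right (by omega) (by omega)
          omega
        set m := min bla blb / 2 with hm
        have hm1 : 1 ≤ m := by omega
        have hma : m ≤ bla - 1 := by omega
        have hmb : m ≤ blb - 1 := by omega
        have hmask : ((1 : Int) <<< m) - 1 = (((2 ^ m - 1 : Nat)) : Int) := by
          rw [Int.shiftLeft_eq, Nat.cast_sub Nat.one_le_two_pow]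
          push_cast; ring
        have hpowa : 2 ^ m ≤ aN := by
          calc (2 : Nat) ^ m ≤ 2 ^ (bla - 1) := Nat.pow_le_pow_right (by omega) hma
            _ ≤ aN := bl_le aN (by omega)
        have hpowb : 2 ^ m ≤ bN := by
          calc (2 : Nat) ^ m ≤ 2 ^ (blb - 1) := Nat.pow_le_pow_right (by omega) hmb
            _ ≤ bN := bl_le bN (by omega)
        have hal_lt : aN % 2 ^ m < aN := by
          have := Nat.mod_lt aN (show 0 < 2 ^ m by positivity)
          omega
        have hah_lt : aN >>> m < aN := by
          rw [Nat.shiftRight_eq_div_pow]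
          exact Nat.div_lt_self (by omega) (Nat.one_lt_two_pow (by omega))
        have hah_bound : aN >>> m < 2 ^ (bla - 1) := by
          rw [Nat.shiftRight_eq_div_pow]
          have h1 : aN < 2 ^ m * 2 ^ (bla - m) := by
            rw [← pow_add, show m + (bla - m) = bla from by omega]
            exact bl_lt aN
          have h2 : (2 : Nat) ^ (bla - m) ≤ 2 ^ (bla - 1) :=
            Nat.pow_le_pow_right (by omega) (by omega)
          have := Nat.div_lt_of_lt_mul (by omega : aN < 2 ^ m * 2 ^ (bla - m))
          omega
        have hal_bound : aN % 2 ^ m < 2 ^ (bla - 1) := by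
          have h2 : (2 : Nat) ^ m ≤ 2 ^ (bla - 1) := Nat.pow_le_pow_right (by omega) hma
          have := Nat.mod_lt aN (show 0 < 2 ^ m by positivity)
          omega
        have hx_lt : (aN >>> m) ^^^ (aN % 2 ^ m) < aN := by
          have hb1 : 2 ^ (bla - 1) ≤ aN := bl_le aN (by omega)
          have := Nat.xor_lt_two_pow hah_bound hal_bound
          omega
        rw [hmask, show (aN : Int) >>> m = (((aN >>> m : Nat)) : Int) from
            (Int.natCast_shiftRight aN m).symm,
          show (bN : Int) >>> m = (((bN >>> m : Nat)) : Int) from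
            (Int.natCast_shiftRight bN m).symm,
          PySem.Int.band_natCast, PySem.Int.band_natCast,
          Nat.and_two_pow_sub_one_eq_mod, Nat.and_two_pow_sub_one_eq_mod,
          PySem.Int.bxor_natCast, PySem.Int.bxor_natCast]
        rw [ih (aN % 2 ^ m) hal_lt f (bN % 2 ^ m) (by omega),
          ih (aN >>> m) hah_lt f (bN >>> m) (by omega),
          ih ((aN >>> m) ^^^ (aN % 2 ^ m)) hx_lt f ((bN >>> m) ^^^ (bN % 2 ^ m)) (by omega)]
        rw [karat_core m (aN >>> m) (aN % 2 ^ m) (bN >>> m) (bN % 2 ^ m),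
          split_xor aN m, split_xor bN m]

-- ---- reduction scan ----

lemma band_one_cast (x : Nat) : PySem.Int.band ((x : Nat) : Int) 1 = ((x % 2 : Nat) : Int) := by
  have h := PySem.Int.band_natCast x 1
  rw [show (((1 : Nat) : Int)) = 1 from rfl] at h
  rw [h, Nat.and_one_is_mod]

lemma pyDeg_natCast (n : Nat) :
    pyDeg (n : Int) = if n = 0 then -1 else (PySem.Int.bitLength (n : Int) : Int) - 1 := by
  unfold pyDeg
  by_cases h : n = 0 <;> simp [h]

lemma xor_top_cancel (j x y : Nat) (hx1 : 2 ^ j ≤ x) (hx2 : x < 2 ^ (j + 1))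
    (hy1 : 2 ^ j ≤ y) (hy2 : y < 2 ^ (j + 1)) : x ^^^ y < 2 ^ j := by
  apply Nat.lt_pow_two_of_testBit
  intro i hi
  rw [Nat.testBit_xor]
  rcases Nat.eq_or_lt_of_le hi with heq | hlt
  · rw [← heq]
    rw [Nat.testBit_of_two_pow_le_and_two_pow_add_one_gt hx1 hx2,
      Nat.testBit_of_two_pow_le_and_two_pow_add_one_gt hy1 hy2]
    rfl
  · have h2 : (2 : Nat) ^ (j + 1) ≤ 2 ^ i := Nat.pow_le_pow_right (by omega) (by omega)
    rw [Nat.testBit_lt_two_pow (by omega), Nat.testBit_lt_two_pow (by omega)]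
    rfl

lemma scan_eq (MN : Nat) (hM : 1 ≤ MN) : ∀ (k : Nat) (rN fuel : Nat),
    rN < 2 ^ ((PySem.Int.bitLength (MN : Int) - 1) + k) → rN < fuel →
    scanB (MN : Int) (PySem.Int.bitLength (MN : Int) - 1) k (rN : Int) =
      polyModReduceA (MN : Int) fuel (rN : Int) := by
  have hblM : 0 < PySem.Int.bitLength (MN : Int) := blN_pos MN hM
  set L := PySem.Int.bitLength (MN : Int) with hL
  set dm := L - 1 with hdm
  have hdegM : pyDeg (MN : Int) = ((dm : Nat) : Int) := by
    rw [pyDeg_natCast, if_neg (by omega)]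
    omega
  intro k
  induction k with
  | zero =>
    intro rN fuel hb fuelh
    cases fuel with
    | zero => omega
    | succ f =>
      have hcond : pyDeg (rN : Int) < pyDeg (MN : Int) := by
        rw [hdegM, pyDeg_natCast]
        by_cases h0 : rN = 0
        · rw [if_pos h0]; omega
        · rw [if_neg h0]
          have hle := bl_le rN h0
          have hpos := blN_pos rN (by omega)
          have hlt : PySem.Int.bitLength (rN : Int) - 1 < dm := by
            by_contra hc
            have h2 : (2 : Nat) ^ dm ≤ 2 ^ (PySem.Int.bitLength (rN : Int) - 1) :=
              Nat.pow_le_pow_right (by omega) (by omega)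
            rw [Nat.add_zero] at hb
            omega
          omega
      simp only [scanB, polyModReduceA]
      rw [if_pos hcond]
  | succ k ih =>
    intro rN fuel hb fuelh
    cases fuel with
    | zero => omega
    | succ f =>
      have hpow : (0 : Nat) < 2 ^ (dm + k) := by positivity
      simp only [scanB]
      rw [← Int.natCast_shiftRight, band_one_cast, Nat.shiftRight_eq_div_pow]
      by_cases hbit : rN / 2 ^ (dm + k) % 2 = 1
      · -- top bit set: both sides take a reduction step
        have hge : 2 ^ (dm + k) ≤ rN := by
          by_contra hc
          rw [Nat.not_le] at hc
          rw [Nat.div_eq_of_lt hc] at hbit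
          simp at hbit
        have hx2 : rN < 2 ^ ((dm + k) + 1) := by
          calc rN < 2 ^ (dm + (k + 1)) := hb
            _ = 2 ^ ((dm + k) + 1) := by ring_nf
        have hblr : PySem.Int.bitLength (rN : Int) = (dm + k) + 1 := bl_eq rN (dm + k) hge hx2
        have hdegr : pyDeg (rN : Int) = (((dm + k) : Nat) : Int) := by
          rw [pyDeg_natCast, if_neg (by intro h0; rw [h0] at hge; omega), hblr]
          push_cast
          omega
        rw [if_pos (by rw [hbit]; simp)]
        conv_rhs => rw [polyModReduceA]
        rw [if_neg (by rw [hdegr, hdegM]; push_cast; omega)]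
        rw [hdegr, hdegM,
          show (((dm + k : Nat) : Int) - ((dm : Nat) : Int)) = ((k : Nat) : Int) from by
            push_cast; ring,
          Int.toNat_natCast]
        rw [← Int.natCast_shiftLeft, PySem.Int.bxor_natCast]
        have hMlt : MN < 2 ^ (dm + 1) := by
          rw [show dm + 1 = L from by omega]
          exact bl_lt MN
        have hMge : 2 ^ dm ≤ MN := bl_le MN (by omega)
        have hy1 : 2 ^ (dm + k) ≤ MN <<< k := by
          rw [Nat.shiftLeft_eq, pow_add]
          exact Nat.mul_le_mul_right _ hMge
        have hy2 : MN <<< k < 2 ^ ((dm + k) + 1) := by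
          have hx := Nat.shiftLeft_lt (x := MN) (n := dm + 1) (m := k) hMlt
          rwa [show dm + 1 + k = (dm + k) + 1 from by omega] at hx
        have hlt' : rN ^^^ MN <<< k < 2 ^ (dm + k) :=
          xor_top_cancel (dm + k) rN (MN <<< k) hge hx2 hy1 hy2
        have hlt'' : rN ^^^ MN <<< k < rN := lt_of_lt_of_le hlt' hge
        exact ih (rN ^^^ MN <<< k) f hlt' (Nat.lt_of_lt_of_le hlt'' (by omega))
      · -- top bit clear: the scan step is a no-op and A does not act at this degree either
        have hq : rN / 2 ^ (dm + k) < 2 := by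
          rw [Nat.div_lt_iff_lt_mul hpow]
          calc rN < 2 ^ (dm + (k + 1)) := hb
            _ = 2 * 2 ^ (dm + k) := by ring
        have hz : rN / 2 ^ (dm + k) = 0 := by
          rcases Nat.mod_two_eq_zero_or_one (rN / 2 ^ (dm + k)) with h0 | h0
          · revert hq h0
            generalize rN / 2 ^ (dm + k) = q
            intro hq h0
            omega
          · exact absurd h0 hbit
        have hlt : rN < 2 ^ (dm + k) := by
          rcases Nat.div_eq_zero_iff.mp hz with h | h
          · omega
          · exact h
        rw [if_neg (by rw [hz]; simp)]
        exact ih rN (f + 1) hlt fuelh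

-- ===== VERDICT (by name: the statement is the Claim_ definition above) =====
theorem poly_mul_mod_py_spec : Claim_equal_poly_mul_mod_py := by
  intro a b mod _ hPre
  unfold Spec_poly_mul_mod_py
  by_cases h0 : a = 0 ∨ b = 0
  · simp [poly_mul_mod_py, poly_mul_mod_py_alt, h0]
  · rcases hPre with h | h | ⟨ha, hb, hm⟩
    · exact absurd (Or.inl h) h0
    · exact absurd (Or.inr h) h0
    obtain ⟨aN, rfl⟩ := Int.eq_ofNat_of_zero_le ha
    obtain ⟨bN, rfl⟩ := Int.eq_ofNat_of_zero_le hb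
    obtain ⟨MN, rfl⟩ := Int.eq_ofNat_of_zero_le (by omega : (0 : Int) ≤ mod)
    have hbN : 0 < bN := by
      rcases Nat.eq_zero_or_pos bN with h | h
      · exact absurd (Or.inr (by simp [h])) h0
      · exact h
    have hMN : 1 ≤ MN := by exact_mod_cast hm
    simp only [poly_mul_mod_py, poly_mul_mod_py_alt, if_neg h0]
    rw [Int.natAbs_natCast, Int.natAbs_natCast]
    rw [show ((0 : Int)) = ((0 : Nat) : Int) from rfl]
    rw [loopA_eq aN bN (bN + 1) 0 (by omega), Nat.zero_xor]
    rw [kmul_eq aN (aN + 1) bN (by omega)]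
    rw [Int.natAbs_natCast]
    symm
    apply scan_eq MN hMN
    · calc mulN aN bN < 2 ^ PySem.Int.bitLength ((mulN aN bN : Nat) : Int) := bl_lt _
        _ ≤ 2 ^ (PySem.Int.bitLength ((MN : Nat) : Int) - 1 +
            (PySem.Int.bitLength ((mulN aN bN : Nat) : Int) -
              (PySem.Int.bitLength ((MN : Nat) : Int) - 1))) :=
          Nat.pow_le_pow_right (by omega) (by omega)
    · omega
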